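-- pv_equiv track=rewrite | github.com/shellydeforte/deconstruct_lc | deconstruct_lc/tools_lc.py | display_lca
-- ===== SOURCE A (Python) =====
-- def seq_to_kmers(sequence, k):
--     """Given a sequence, return a list of all overlapping k-mers"""
--     i = 0
--     len_sequence = len(sequence)
--     kmers = []
--     while i+k <= len_sequence:
--         kmers.append(sequence[i:i+k])
--         i += 1
--     return kmers
--
-- def lca_motif(kmer, lca):
--     """Checks to see if the sequence contains only those amino acids as
--     defined in the lca (a string)'"""
--     in_motif = set(lca)
--     if set(kmer) <= in_motif:
--         return True
--     else:
--         return False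
--
-- def display_lca(sequence, alph_lca, k_lca):
--     """Given a sequence, mark the motifs with a 'O'"""
--     kmers_lca = seq_to_kmers(sequence, k_lca)
--     indexes = set()
--     for i, kmer in enumerate(kmers_lca):
--         if lca_motif(kmer, alph_lca):
--             for item in range(i, i+k_lca):
--                 indexes.add(item)
--     new_sequence = ''
--     for i, let in enumerate(sequence):
--         if i in indexes:
--             new_sequence += 'O'
--         else:
--             new_sequence += let
--     return new_sequence
-- ===== SOURCE B (Python) =====
-- def display_lca(sequence, alph_lca, k_lca):
--     """Given a sequence, mark the motifs with a 'O'"""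
--     if k_lca <= 0:
--         return sequence
--     allowed = set(alph_lca)
--     parts = []
--     run = []  # current maximal run of allowed characters
--     for ch in sequence:
--         if ch in allowed:
--             run.append(ch)
--         else:
--             parts.append('O' * len(run) if len(run) >= k_lca else ''.join(run))
--             parts.append(ch)
--             run = []
--     parts.append('O' * len(run) if len(run) >= k_lca else ''.join(run))
--     return ''.join(parts)
-- ===== Notes on version B (the rewrite author's own statement) =====
-- stated objective: faster
-- what changed: Instead of enumerating every k-mer window, testing each against the alphabet and collecting covered indices in a set, B makes one pass over the sequence splitting it into maximal runs of allowed characters and replaces each run of length >= k by 'O's.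
import Mathlib
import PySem

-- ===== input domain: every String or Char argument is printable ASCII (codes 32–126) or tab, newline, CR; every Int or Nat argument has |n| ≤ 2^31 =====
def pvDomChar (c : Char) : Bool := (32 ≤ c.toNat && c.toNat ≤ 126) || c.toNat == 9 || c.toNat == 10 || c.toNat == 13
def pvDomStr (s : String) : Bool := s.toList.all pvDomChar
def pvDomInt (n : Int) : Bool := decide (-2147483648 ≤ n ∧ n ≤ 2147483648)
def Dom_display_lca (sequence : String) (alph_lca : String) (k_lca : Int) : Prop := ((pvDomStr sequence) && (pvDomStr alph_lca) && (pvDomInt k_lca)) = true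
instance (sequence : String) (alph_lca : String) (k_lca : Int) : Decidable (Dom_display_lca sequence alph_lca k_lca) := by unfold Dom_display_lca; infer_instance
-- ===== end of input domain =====

-- B replaces A's per-window k-mer scan (O(n*k)) with a single pass that splits the
-- sequence into maximal runs of allowed characters and marks runs of length ≥ k.


-- ===== PORT A =====
-- lca_motif(kmer, lca): set(kmer) <= set(lca)
def pvMotifOk (kmer lca : List Char) : Bool :=
  PySem.Set.issubset (PySem.Set.ofList kmer) (PySem.Set.ofList lca)

-- the while-loop of seq_to_kmers; the fuel is exactly the number of iterations left
def pvKmersGo (s : List Char) (k : Int) : Int → List (List Char) → Nat → List (List Char)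
  | _, acc, 0 => acc.reverse
  | i, acc, fuel+1 =>
    if i + k ≤ (s.length : Int) then
      pvKmersGo s k (i+1) (PySem.List.slice s (some i) (some (i+k)) :: acc) fuel
    else acc.reverse

def pvSeqToKmers (s : List Char) (k : Int) : List (List Char) :=
  pvKmersGo s k 0 [] (((s.length : Int) - k + 1).toNat)

-- 'for i, kmer in enumerate(kmers_lca)' is ported as a fold carrying the counter i
def display_lca (sequence : String) (alph_lca : String) (k_lca : Int) : String :=
  let kmers := pvSeqToKmers sequence.toList k_lca
  let indexes : PySem.Set Int :=
    (kmers.foldl (fun (st : Int × PySem.Set Int) kmer =>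
      (st.1 + 1,
       if pvMotifOk kmer alph_lca.toList then
         (PySem.List.pyRange st.1 (st.1 + k_lca) 1).foldl
           (fun ix item => PySem.Set.add ix item) st.2
       else st.2)) ((0 : Int), PySem.Set.empty)).2
  String.ofList ((PySem.List.enumerate sequence.toList 0).foldl (fun acc pr =>
      if PySem.Set.contains indexes pr.1 then acc ++ ['O'] else acc ++ [pr.2]) [])

-- ===== PORT B =====
-- one finished run: replaced by 'O's iff its length is at least k
def pvRunOut (run : List Char) (k : Int) : List Char :=
  if k ≤ (run.length : Int) then List.replicate run.length 'O' else run

-- single pass: 'run' accumulates the current run of allowed characters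
def pvAltGo (allowed : PySem.Set Char) (k : Int) : List Char → List Char → List Char
  | [], run => pvRunOut run k
  | c :: rest, run =>
    if PySem.Set.contains allowed c then pvAltGo allowed k rest (run ++ [c])
    else pvRunOut run k ++ c :: pvAltGo allowed k rest []

def display_lca_alt (sequence : String) (alph_lca : String) (k_lca : Int) : String :=
  if k_lca ≤ 0 then sequence
  else String.ofList (pvAltGo (PySem.Set.ofList alph_lca.toList) k_lca sequence.toList [])

-- ===== PRECONDITION & SPEC =====
def Spec_display_lca (sequence : String) (alph_lca : String) (k_lca : Int) (out : String) : Prop := out = display_lca_alt sequence alph_lca k_lca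
instance (sequence : String) (alph_lca : String) (k_lca : Int) (out : String) : Decidable (Spec_display_lca sequence alph_lca k_lca out) := by unfold Spec_display_lca; infer_instance

-- ===== CLAIM (what is proved, stated in full; the proofs are below) =====
def Claim_equal_display_lca : Prop := ∀ (sequence : String) (alph_lca : String) (k_lca : Int), Dom_display_lca sequence alph_lca k_lca → Spec_display_lca sequence alph_lca k_lca (display_lca sequence alph_lca k_lca)

-- ===== LEMMAS AND PROOFS =====

def pvCovB (p : Char → Bool) (K : Nat) (t : List Char) (j : Nat) : Bool :=
  (List.range (j+1)).any (fun i =>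
    decide (j < i + K) && decide (i + K ≤ t.length) &&
    (List.range K).all (fun d => p (t.getD (i+d) ' ')))

def pvCov (p : Char → Bool) (K : Nat) (t : List Char) (j : Nat) : Prop :=
  ∃ i, i ≤ j ∧ j < i + K ∧ i + K ≤ t.length ∧ ∀ d, d < K → p (t.getD (i+d) ' ') = true

def pvRef (p : Char → Bool) (K : Nat) (t : List Char) : List Char :=
  (List.range t.length).map (fun j => if pvCovB p K t j then 'O' else t.getD j ' ')

theorem pvCovB_iff (p : Char → Bool) (K : Nat) (t : List Char) (j : Nat) :
    pvCovB p K t j = true ↔ pvCov p K t j := by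
  unfold pvCovB pvCov
  simp only [List.any_eq_true, List.mem_range, List.all_eq_true, Bool.and_eq_true,
    decide_eq_true_eq]
  constructor
  · rintro ⟨i, hi, ⟨h1, h2⟩, h3⟩
    exact ⟨i, by omega, h1, h2, h3⟩
  · rintro ⟨i, hi, h1, h2, h3⟩
    exact ⟨i, by omega, ⟨h1, h2⟩, h3⟩

theorem pv_getD_lt {t : List Char} {m : Nat} (h : m < t.length) : t.getD m ' ' = t[m] := by
  simp [List.getD_eq_getElem?_getD, List.getElem?_eq_getElem h]

theorem pv_ref_allowed (p : Char → Bool) (K : Nat) (t : List Char)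
    (hK : 1 ≤ K) (hall : ∀ x ∈ t, p x = true) :
    pvRef p K t = if K ≤ t.length then List.replicate t.length 'O' else t := by
  apply List.ext_getElem
  · split <;> simp [pvRef]
  · intro j hj _
    have hjt : j < t.length := by simpa [pvRef] using hj
    by_cases hKt : K ≤ t.length
    · have hcov : pvCovB p K t j = true := by
        rw [pvCovB_iff]
        refine ⟨min j (t.length - K), by omega, by omega, by omega, ?_⟩
        intro d hd
        have hlt : min j (t.length - K) + d < t.length := by omega
        rw [pv_getD_lt hlt]
        exact hall _ (List.getElem_mem _)
      simp [pvRef, hcov, hKt]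
    · have hcov : pvCovB p K t j = false := by
        rw [Bool.eq_false_iff, Ne, pvCovB_iff]
        rintro ⟨i, _, _, h2, _⟩
        omega
      simp [pvRef, hcov, hKt, hjt]

theorem pv_getD_app (run rest : List Char) (c : Char) (m : Nat) :
    (run ++ c :: rest).getD m ' ' =
      if m < run.length then run.getD m ' '
      else if m = run.length then c
      else rest.getD (m - run.length - 1) ' ' := by
  split
  · next h => rw [List.getD_append _ _ _ _ h]
  · next h =>
    rw [List.getD_append_right _ _ _ _ (by omega)]
    split
    · next he => simp [he]
    · next he =>
      have : m - run.length = (m - run.length - 1) + 1 := by omega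
      rw [this]; simp

theorem pv_cov_left (p : Char → Bool) (K : Nat) (run rest : List Char) (c : Char)
    (hc : p c = false) (j : Nat) (hj : j < run.length) :
    pvCovB p K (run ++ c :: rest) j = pvCovB p K run j := by
  rw [Bool.eq_iff_iff, pvCovB_iff, pvCovB_iff]
  constructor
  · rintro ⟨i, h1, h2, h3, h4⟩
    have hiK : i + K ≤ run.length := by
      by_contra hcon
      have := h4 (run.length - i) (by omega)
      rw [show i + (run.length - i) = run.length by omega, pv_getD_app] at this
      simp [hc] at this
    refine ⟨i, h1, h2, hiK, ?_⟩
    intro d hd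
    have := h4 d hd
    rwa [pv_getD_app, if_pos (by omega)] at this
  · rintro ⟨i, h1, h2, h3, h4⟩
    refine ⟨i, h1, h2, by simp only [List.length_append, List.length_cons]; omega, ?_⟩
    intro d hd
    rw [pv_getD_app, if_pos (by omega)]
    exact h4 d hd

theorem pv_cov_mid (p : Char → Bool) (K : Nat) (run rest : List Char) (c : Char)
    (hc : p c = false) :
    pvCovB p K (run ++ c :: rest) run.length = false := by
  rw [Bool.eq_false_iff, Ne, pvCovB_iff]
  rintro ⟨i, h1, h2, h3, h4⟩
  have := h4 (run.length - i) (by omega)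
  rw [show i + (run.length - i) = run.length by omega, pv_getD_app] at this
  simp [hc] at this

theorem pv_cov_right (p : Char → Bool) (K : Nat) (run rest : List Char) (c : Char)
    (hc : p c = false) (j : Nat) :
    pvCovB p K (run ++ c :: rest) (run.length + 1 + j) = pvCovB p K rest j := by
  rw [Bool.eq_iff_iff, pvCovB_iff, pvCovB_iff]
  constructor
  · rintro ⟨i, h1, h2, h3, h4⟩
    have hlen : i + K ≤ run.length + 1 + rest.length := by
      simp only [List.length_append, List.length_cons] at h3; omega
    have hi : run.length + 1 ≤ i := by
      by_contra hcon
      have := h4 (run.length - i) (by omega)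
      rw [show i + (run.length - i) = run.length by omega, pv_getD_app] at this
      simp [hc] at this
    refine ⟨i - run.length - 1, by omega, by omega, by omega, ?_⟩
    intro d hd
    have h5 := h4 d hd
    rw [pv_getD_app, if_neg (by omega), if_neg (by omega)] at h5
    rwa [show i - run.length - 1 + d = i + d - run.length - 1 by omega]
  · rintro ⟨i, h1, h2, h3, h4⟩
    refine ⟨run.length + 1 + i, by omega, by omega,
      by simp only [List.length_append, List.length_cons]; omega, ?_⟩
    intro d hd
    rw [pv_getD_app, if_neg (by omega), if_neg (by omega),
      show run.length + 1 + i + d - run.length - 1 = i + d by omega]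
    exact h4 d hd

theorem pv_ref_split (p : Char → Bool) (K : Nat) (run rest : List Char) (c : Char)
    (hc : p c = false) :
    pvRef p K (run ++ c :: rest) = pvRef p K run ++ c :: pvRef p K rest := by
  unfold pvRef
  have hlen : (run ++ c :: rest).length = run.length + (1 + rest.length) := by
    simp; omega
  rw [hlen, List.range_add, List.map_append]
  congr 1
  · apply List.map_congr_left
    intro j hj
    have hj' : j < run.length := List.mem_range.mp hj
    rw [pv_cov_left p K run rest c hc j hj', pv_getD_app, if_pos hj']
  · rw [List.map_map]
    have h2 : List.range (1 + rest.length) = 0 :: (List.range rest.length).map (fun x => 1 + x) := by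
      rw [List.range_add, List.range_one]; simp
    rw [h2, List.map_cons, List.map_map]
    congr 1
    · show (if pvCovB p K (run ++ c :: rest) (run.length + 0) = true then 'O'
          else (run ++ c :: rest).getD (run.length + 0) ' ') = c
      rw [Nat.add_zero, pv_cov_mid p K run rest c hc, pv_getD_app]
      simp
    · apply List.map_congr_left
      intro j _
      show (if pvCovB p K (run ++ c :: rest) (run.length + (1 + j)) = true then 'O'
          else (run ++ c :: rest).getD (run.length + (1 + j)) ' ') = _
      rw [show run.length + (1 + j) = run.length + 1 + j by omega,
        pv_cov_right p K run rest c hc j]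
      by_cases hcb : pvCovB p K rest j = true
      · simp [hcb]
      · simp only [Bool.not_eq_true] at hcb
        simp only [hcb, Bool.false_eq_true, if_false]
        rw [pv_getD_app, if_neg (by omega), if_neg (by omega)]
        congr 1
        omega

theorem pv_runOut_eq (run : List Char) (k : Int) (hk : 1 ≤ k) :
    pvRunOut run k = if k.toNat ≤ run.length then List.replicate run.length 'O' else run := by
  unfold pvRunOut
  by_cases h : k ≤ (run.length : Int)
  · rw [if_pos h, if_pos (by omega)]
  · rw [if_neg h, if_neg (by omega)]

theorem pv_altGo_eq_ref' (allowed : PySem.Set Char) (k : Int) (hk : 1 ≤ k) :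
    ∀ (s run : List Char), (∀ x ∈ run, PySem.Set.contains allowed x = true) →
    pvAltGo allowed k s run =
      pvRef (fun c => PySem.Set.contains allowed c) k.toNat (run ++ s) := by
  intro s
  induction s with
  | nil =>
    intro run hrun
    rw [List.append_nil]
    show pvRunOut run k = _
    rw [pv_runOut_eq run k hk,
      pv_ref_allowed (fun c => PySem.Set.contains allowed c) k.toNat run (by omega) hrun]
  | cons c rest ih =>
    intro run hrun
    show (if PySem.Set.contains allowed c then pvAltGo allowed k rest (run ++ [c])
      else pvRunOut run k ++ c :: pvAltGo allowed k rest []) = _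
    by_cases hc : PySem.Set.contains allowed c = true
    · have hrun' : ∀ x ∈ run ++ [c], PySem.Set.contains allowed x = true := by
        intro x hx
        rcases List.mem_append.mp hx with h | h
        · exact hrun x h
        · simp at h; subst h; exact hc
      rw [if_pos hc, ih (run ++ [c]) hrun', List.append_assoc]
      rfl
    · rw [if_neg hc]
      have hc' : PySem.Set.contains allowed c = false := by
        rwa [Bool.not_eq_true] at hc
      rw [pv_ref_split (fun c => PySem.Set.contains allowed c) k.toNat run rest c hc',
        pv_runOut_eq run k hk,
        pv_ref_allowed (fun c => PySem.Set.contains allowed c) k.toNat run (by omega) hrun,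
        ih [] (by simp)]
      simp [pvRef]

theorem pv_kmersGo_eq (s : List Char) (k : Int) (hk : 1 ≤ k) :
    ∀ (fuel : Nat) (i : Nat) (acc : List (List Char)),
      fuel = (((s.length : Int) - k + 1) - i).toNat →
      pvKmersGo s k i acc fuel =
        acc.reverse ++ (List.range fuel).map (fun t => (s.drop (i + t)).take k.toNat) := by
  intro fuel
  induction fuel with
  | zero => intro i acc _; simp [pvKmersGo]
  | succ fuel ih =>
    intro i acc hf
    have hcond : (i : Int) + k ≤ (s.length : Int) := by omega
    show (if (i : Int) + k ≤ (s.length : Int) then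
        pvKmersGo s k ((i : Int)+1) (PySem.List.slice s (some i) (some ((i : Int)+k)) :: acc) fuel
      else acc.reverse) = _
    rw [if_pos hcond]
    have hcast : ((i : Int) + 1) = ((i + 1 : Nat) : Int) := by push_cast; ring
    have hslice : PySem.List.slice s (some (i : Int)) (some ((i : Int)+k)) =
        (s.drop i).take k.toNat := by
      rw [PySem.List.slice_toNat s (by omega) (by omega)]
      congr 1
      omega
    rw [hslice, hcast, ih (i+1) _ (by omega)]
    rw [List.reverse_cons, List.append_assoc]
    congr 1
    rw [List.range_succ_eq_map, List.map_cons, List.map_map, List.singleton_append]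
    congr 1
    apply List.map_congr_left
    intro a _
    simp only [Function.comp_apply, Nat.succ_eq_add_one]
    congr 2
    omega

theorem pv_mem_indexes (k : Int) (alph : List Char) (kmers : List (List Char))
    (i0 : Int) (init : PySem.Set Int) (j : Int) :
    (j ∈ (kmers.foldl (fun (st : Int × PySem.Set Int) kmer =>
        (st.1 + 1,
         if pvMotifOk kmer alph then
           (PySem.List.pyRange st.1 (st.1 + k) 1).foldl
             (fun ix item => PySem.Set.add ix item) st.2
         else st.2)) (i0, init)).2) ↔
      j ∈ init ∨ ∃ t, ∃ _ : t < kmers.length,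
        pvMotifOk kmers[t] alph = true ∧ i0 + t ≤ j ∧ j < i0 + t + k := by
  induction kmers generalizing i0 init with
  | nil => simp
  | cons kmer rest ih =>
    rw [List.foldl_cons, ih]
    by_cases hm : pvMotifOk kmer alph = true
    · simp only [hm, if_pos]
      have hmem : j ∈ (PySem.List.pyRange i0 (i0 + k) 1).foldl
          (fun ix item => PySem.Set.add ix item) init ↔
          j ∈ init ∨ (i0 ≤ j ∧ j < i0 + k) := by
        rw [show (fun (ix : PySem.Set Int) item => PySem.Set.add ix item) =
          (fun (ix : PySem.Set Int) item => PySem.Set.add ix (id item)) by rfl]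
        rw [PySem.Set.mem_foldl_add]
        simp [PySem.List.mem_pyRange_one]
      rw [hmem]
      constructor
      · rintro ((h | h) | ⟨t, ht, hok, h1, h2⟩)
        · exact Or.inl h
        · exact Or.inr ⟨0, by simp, by simpa using hm, by omega, by omega⟩
        · exact Or.inr ⟨t+1, by simpa using ht, by simpa using hok, by push_cast; omega,
            by push_cast at h2 ⊢; omega⟩
      · rintro (h | ⟨t, ht, hok, h1, h2⟩)
        · exact Or.inl (Or.inl h)
        · match t with
          | 0 => exact Or.inl (Or.inr ⟨by simpa using h1, by push_cast at h2; omega⟩)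
          | t+1 => exact Or.inr ⟨t, by simpa using ht, by simpa using hok,
              by push_cast at h1 ⊢; omega, by push_cast at h2 ⊢; omega⟩
    · simp only [hm, Bool.false_eq_true, if_false]
      constructor
      · rintro (h | ⟨t, ht, hok, h1, h2⟩)
        · exact Or.inl h
        · exact Or.inr ⟨t+1, by simpa using ht, by simpa using hok, by push_cast; omega,
            by push_cast at h2 ⊢; omega⟩
      · rintro (h | ⟨t, ht, hok, h1, h2⟩)
        · exact Or.inl h
        · match t with
          | 0 => exact absurd (by simpa using hok) hm
          | t+1 => exact Or.inr ⟨t, by simpa using ht, by simpa using hok,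
              by push_cast at h1 ⊢; omega, by push_cast at h2 ⊢; omega⟩

theorem pv_out_fold (xs : List Char) (g : Int → Bool) :
    (PySem.List.enumerate xs 0).foldl (fun acc pr =>
        if g pr.1 then acc ++ ['O'] else acc ++ [pr.2]) [] =
      (List.range xs.length).map (fun (j : Nat) => if g (j : Int) then 'O' else xs.getD j ' ') := by
  have h1 : (PySem.List.enumerate xs 0).foldl (fun acc pr =>
      if g pr.1 then acc ++ ['O'] else acc ++ [pr.2]) [] =
      (PySem.List.enumerate xs 0).map (fun pr => if g pr.1 then 'O' else pr.2) := by
    have hfun : (fun (acc : List Char) (pr : Int × Char) =>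
        if g pr.1 then acc ++ ['O'] else acc ++ [pr.2]) =
        fun acc pr => acc ++ [if g pr.1 then 'O' else pr.2] := by
      funext acc pr
      split <;> rfl
    rw [hfun, PySem.List.foldl_append_singleton_eq_map, List.nil_append]
  rw [h1]
  apply List.ext_getElem
  · simp [PySem.List.length_enumerate]
  · intro j hj hj2
    have hjx : j < xs.length := by
      simpa [PySem.List.length_enumerate] using hj
    simp only [List.getElem_map, List.getElem_range, PySem.List.getElem_enumerate]
    rw [pv_getD_lt hjx]
    norm_num

theorem pv_motifOk_eq_all (km al : List Char) :
    pvMotifOk km al = km.all (fun c => PySem.Set.contains (PySem.Set.ofList al) c) := by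
  rw [Bool.eq_iff_iff]
  simp [pvMotifOk, PySem.Set.issubset_iff, PySem.Set.mem_ofList, List.all_eq_true]

theorem pv_window_all (p : Char → Bool) (s : List Char) (t K : Nat) (h : t + K ≤ s.length) :
    ((s.drop t).take K).all p = true ↔ ∀ d, d < K → p (s.getD (t+d) ' ') = true := by
  rw [List.all_eq_true]
  constructor
  · intro hall d hd
    have hlt : t + d < s.length := by omega
    have he : s.getD (t+d) ' ' = ((s.drop t).take K)[d]'(by
      simp [List.length_take, List.length_drop]; omega) := by
      rw [pv_getD_lt hlt]
      simp [List.getElem_take, List.getElem_drop]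
    rw [he]
    exact hall _ (List.getElem_mem _)
  · intro hall x hx
    obtain ⟨d, hd, rfl⟩ := List.mem_iff_getElem.mp hx
    have hdK : d < K := by
      have := hd; simp [List.length_take, List.length_drop] at this; omega
    have hlt : t + d < s.length := by omega
    have he : ((s.drop t).take K)[d] = s.getD (t+d) ' ' := by
      rw [pv_getD_lt hlt]
      simp [List.getElem_take, List.getElem_drop]
    rw [he]; exact hall d hdK

theorem pv_kmers_eq (s : List Char) (k : Int) (hk : 1 ≤ k) :
    pvSeqToKmers s k =
      (List.range (((s.length : Int) - k + 1).toNat)).map (fun t => (s.drop t).take k.toNat) := by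
  have h := pv_kmersGo_eq s k hk (((s.length : Int) - k + 1).toNat) 0 [] (by simp)
  simpa [pvSeqToKmers] using h

theorem pv_A_eq_ref (sequence alph_lca : String) (k : Int) (hk : 1 ≤ k) :
    display_lca sequence alph_lca k =
      String.ofList (pvRef (fun c => PySem.Set.contains (PySem.Set.ofList alph_lca.toList) c)
        k.toNat sequence.toList) := by
  set sl := sequence.toList with hsl
  set al := alph_lca.toList with hal
  set p : Char → Bool := fun c => PySem.Set.contains (PySem.Set.ofList al) c with hp
  simp only [display_lca]
  rw [pv_out_fold]
  congr 1
  unfold pvRef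
  apply List.map_congr_left
  intro j hj
  have hjN : j < sl.length := List.mem_range.mp hj
  have hcontains : PySem.Set.contains
      (((pvSeqToKmers sl k).foldl (fun (st : Int × PySem.Set Int) kmer =>
        (st.1 + 1,
         if pvMotifOk kmer al then
           (PySem.List.pyRange st.1 (st.1 + k) 1).foldl
             (fun ix item => PySem.Set.add ix item) st.2
         else st.2)) ((0 : Int), PySem.Set.empty)).2) (j : Int) = pvCovB p k.toNat sl j := by
    rw [Bool.eq_iff_iff, PySem.Set.contains_iff, pv_mem_indexes, pvCovB_iff]
    have hkm := pv_kmers_eq sl k hk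
    constructor
    · rintro (h | ⟨t, ht, hok, h1, h2⟩)
      · simp [PySem.Set.empty] at h
      · have htlen : t < (((sl.length : Int) - k + 1).toNat) := by
          rw [hkm] at ht; simpa using ht
        have htK : t + k.toNat ≤ sl.length := by omega
        have hget : (pvSeqToKmers sl k)[t]'ht = (sl.drop t).take k.toNat := by
          simp [hkm]
        rw [hget, pv_motifOk_eq_all, ← hp, pv_window_all p sl t k.toNat htK] at hok
        exact ⟨t, by omega, by omega, htK, hok⟩
    · rintro ⟨i, h1, h2, h3, h4⟩
      right
      have hiM : i < (((sl.length : Int) - k + 1).toNat) := by omega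
      have hilen : i < (pvSeqToKmers sl k).length := by rw [hkm]; simpa using hiM
      refine ⟨i, hilen, ?_, by omega, by omega⟩
      have hget : (pvSeqToKmers sl k)[i]'hilen = (sl.drop i).take k.toNat := by
        simp [hkm]
      rw [hget, pv_motifOk_eq_all, ← hp, pv_window_all p sl i k.toNat h3]
      exact h4
  rw [hcontains]

theorem pv_fold_nonpos (k : Int) (hk : k ≤ 0) (alph : List Char)
    (kmers : List (List Char)) (i0 : Int) (init : PySem.Set Int) :
    (kmers.foldl (fun (st : Int × PySem.Set Int) kmer =>
        (st.1 + 1,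
         if pvMotifOk kmer alph then
           (PySem.List.pyRange st.1 (st.1 + k) 1).foldl
             (fun ix item => PySem.Set.add ix item) st.2
         else st.2)) (i0, init)).2 = init := by
  induction kmers generalizing i0 init with
  | nil => rfl
  | cons kmer rest ih =>
    rw [List.foldl_cons, PySem.List.pyRange_one_eq_nil (by omega : i0 + k ≤ i0)]
    simp only [List.foldl_nil, ite_self]
    exact ih (i0 + 1) init

theorem pv_A_nonpos (sequence alph_lca : String) (k : Int) (hk : k ≤ 0) :
    display_lca sequence alph_lca k = sequence := by
  simp only [display_lca]
  rw [pv_fold_nonpos k hk]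
  rw [pv_out_fold]
  have hmap : (List.range sequence.toList.length).map
      (fun (j : Nat) => if PySem.Set.contains PySem.Set.empty ((j : Nat) : Int) then 'O'
        else sequence.toList.getD j ' ') = sequence.toList := by
    apply List.ext_getElem
    · simp
    · intro j hj hj2
      have hjN : j < sequence.toList.length := by simpa using hj2
      simp only [List.getElem_map, List.getElem_range]
      rw [pv_getD_lt hjN]
      simp [PySem.Set.empty, PySem.Set.contains]
  rw [hmap, String.ofList_toList]

-- ===== VERDICT (by name: the statement is the Claim_ definition above) =====
theorem display_lca_spec : Claim_equal_display_lca := by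
  intro sequence alph_lca k _
  unfold Spec_display_lca display_lca_alt
  by_cases hk : k ≤ 0
  · rw [if_pos hk]
    exact pv_A_nonpos sequence alph_lca k hk
  · have hk1 : 1 ≤ k := by omega
    rw [if_neg hk]
    rw [pv_A_eq_ref sequence alph_lca k hk1,
        pv_altGo_eq_ref' _ k hk1 sequence.toList [] (by simp)]
    simp
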